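-- pv_equiv track=rewrite | github.com/yusefgharib/Learning-CS | Python/Projects/Hyperskill Projects/Hard/Duskers/utils/global_tests.py | check_graphical_robots
-- ===== SOURCE A (Python) =====
-- from typing import List
--
-- def check_graphical_robots(robots_display: List[str], number_of_robots: int) \
--         -> bool:
--     """helper method to check for arbitrary number of robots"""
--     result = True
--
--     for line in robots_display:
--         robot_length = len(line) // number_of_robots
--
--         if robot_length == 0:
--             continue
--
--         robots = [line[start:start + robot_length]
--                   for start in range(0, len(line), robot_length)]
--
--         first_robot = robots[0]
--         result = result and all(robot == first_robot for robot in robots[1:])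
--
--     return result
-- ===== SOURCE B (Python) =====
-- from typing import List
--
-- def check_graphical_robots(robots_display: List[str], number_of_robots: int) \
--         -> bool:
--     """helper method to check for arbitrary number of robots"""
--     ok = True
--     for line in robots_display:
--         robot_length = len(line) // number_of_robots
--         if robot_length == 0:
--             continue
--         ok = ok and len(line) % robot_length == 0 and all(
--             line[i] == line[i % robot_length]
--             for i in range(robot_length, len(line)))
--     return ok
-- ===== Notes on version B (the rewrite author's own statement) =====
-- stated objective: simpler
-- what changed: Instead of building the list of sliced segments and comparing each to the first, B checks each line's periodicity in place: the length must be a multiple of the segment length and every character must equal the one at its index modulo the segment length; no intermediate lists are built.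
import Mathlib
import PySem

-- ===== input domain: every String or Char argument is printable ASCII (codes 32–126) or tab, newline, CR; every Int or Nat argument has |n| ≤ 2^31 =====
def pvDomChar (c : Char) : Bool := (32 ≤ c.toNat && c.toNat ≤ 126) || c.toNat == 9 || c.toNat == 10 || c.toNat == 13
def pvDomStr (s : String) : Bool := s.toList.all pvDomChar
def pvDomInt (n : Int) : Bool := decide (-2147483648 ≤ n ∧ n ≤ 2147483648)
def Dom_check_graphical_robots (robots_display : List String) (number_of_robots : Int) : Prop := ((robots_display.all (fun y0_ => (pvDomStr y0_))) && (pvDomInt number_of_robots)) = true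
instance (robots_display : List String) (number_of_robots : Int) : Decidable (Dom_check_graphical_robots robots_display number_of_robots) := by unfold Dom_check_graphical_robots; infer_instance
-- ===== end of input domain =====

-- B checks each line's periodicity in place (length divisible by segment length, char i = char (i mod seglen))
-- instead of building and comparing sliced segments: simpler, no intermediate lists.

-- ===== PORT A =====
def check_graphical_robots (robots_display : List String) (number_of_robots : Int) : Bool :=
  robots_display.foldl (fun result line =>
    let cs := line.toList
    let L : Int := (cs.length : Int)
    let robot_length := PySem.Int.floordiv L number_of_robots
    if robot_length = 0 then result
    else
      let robots := (PySem.List.pyRange 0 L robot_length).map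
        (fun start => PySem.List.slice cs (some start) (some (start + robot_length)))
      match robots with
      | [] => result        -- Python raises IndexError here (robots[0]); excluded by Pre_
      | first_robot :: rest => result && rest.all (fun robot => robot == first_robot)
  ) true

-- ===== PORT B =====
def check_graphical_robots_alt (robots_display : List String) (number_of_robots : Int) : Bool :=
  robots_display.foldl (fun ok line =>
    let cs := line.toList
    let L : Int := (cs.length : Int)
    let robot_length := PySem.Int.floordiv L number_of_robots
    if robot_length = 0 then ok
    else
      ok && (PySem.Int.mod L robot_length == 0) &&
        (PySem.List.pyRange robot_length L 1).all (fun i =>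
          PySem.List.pyGet? cs i == PySem.List.pyGet? cs (PySem.Int.mod i robot_length))
  ) true

-- ===== PRECONDITION & SPEC =====
-- Pre_ excludes exactly the inputs where Python A raises: a non-empty display with number_of_robots = 0
-- (ZeroDivisionError in len(line) // number_of_robots) and number_of_robots < 0 with some non-empty line
-- (robots is then the empty list and robots[0] raises IndexError).
def Pre_check_graphical_robots (robots_display : List String) (number_of_robots : Int) : Prop :=
  ∀ line ∈ robots_display, number_of_robots ≠ 0 ∧ (0 < number_of_robots ∨ line = "")
instance (robots_display : List String) (number_of_robots : Int) : Decidable (Pre_check_graphical_robots robots_display number_of_robots) := by unfold Pre_check_graphical_robots; infer_instance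
def pvWitness_check_graphical_robots : List String × Int := (["<||><||>", "=^^="], 2)

def Spec_check_graphical_robots (robots_display : List String) (number_of_robots : Int) (out : Bool) : Prop := out = check_graphical_robots_alt robots_display number_of_robots
instance (robots_display : List String) (number_of_robots : Int) (out : Bool) : Decidable (Spec_check_graphical_robots robots_display number_of_robots out) := by unfold Spec_check_graphical_robots; infer_instance

-- ===== CLAIM (what is proved, stated in full; the proofs are below) =====
def Claim_equal_check_graphical_robots : Prop := ∀ (robots_display : List String) (number_of_robots : Int), Dom_check_graphical_robots robots_display number_of_robots → Pre_check_graphical_robots robots_display number_of_robots → Spec_check_graphical_robots robots_display number_of_robots (check_graphical_robots robots_display number_of_robots)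

-- ===== LEMMAS AND PROOFS =====

-- ===== VERDICT (by name: the statement is the Claim_ definition above) =====

theorem core_fwd_dvd (cs : List Char) (k m : Nat) (hk : 0 < k) (hkm : k ≤ m) (hm : m = cs.length)
    (H : ∀ j, 0 < j → k*j < m → (cs.drop (k*j)).take k = cs.take k) : k ∣ m := by
  by_contra hnd
  have hr0 : m % k ≠ 0 := fun h => hnd (Nat.dvd_of_mod_eq_zero h)
  have hrk : m % k < k := Nat.mod_lt _ hk
  have hq : k * (m / k) + m % k = m := Nat.div_add_mod m k
  have hjpos : 0 < m / k := Nat.div_pos hkm hk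
  have hlt : k * (m / k) < m := by omega
  have := congrArg List.length (H (m / k) hjpos hlt)
  simp [List.length_take, List.length_drop, ← hm] at this
  omega

theorem core_fwd_per (cs : List Char) (k m : Nat) (hk : 0 < k) (hm : m = cs.length)
    (H : ∀ j, 0 < j → k*j < m → (cs.drop (k*j)).take k = cs.take k) :
    ∀ t, k ≤ t → t < m → cs[t]? = cs[t % k]? := by
  intro t hkt htm
  have hrk : t % k < k := Nat.mod_lt _ hk
  have hq : k * (t / k) + t % k = t := Nat.div_add_mod t k
  have hjpos : 0 < t / k := Nat.div_pos hkt hk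
  have hlt : k * (t / k) < m := by omega
  have h := congrArg (fun l => l[t % k]?) (H (t / k) hjpos hlt)
  simp only [List.getElem?_take, List.getElem?_drop] at h
  rw [if_pos hrk, if_pos hrk] at h
  have : k * (t / k) + t % k = t := by omega
  rwa [this] at h

theorem core_bwd (cs : List Char) (k m : Nat) (hkm : k ≤ m) (hm : m = cs.length)
    (hd : k ∣ m) (hper : ∀ t, k ≤ t → t < m → cs[t]? = cs[t % k]?) :
    ∀ j, 0 < j → k*j < m → (cs.drop (k*j)).take k = cs.take k := by
  intro j hj hjm
  obtain ⟨q, rfl⟩ := hd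
  have hjq : j < q := Nat.lt_of_mul_lt_mul_left hjm
  have hjk : k * (j+1) ≤ k * q := Nat.mul_le_mul_left _ hjq
  have hm1 : k * (j+1) = k*j + k := by ring
  apply List.ext_getElem?
  intro i
  simp only [List.getElem?_take, List.getElem?_drop]
  by_cases hik : i < k
  · rw [if_pos hik, if_pos hik]
    have ht := hper (k*j + i) (by nlinarith) (by omega)
    rw [Nat.mul_add_mod, Nat.mod_eq_of_lt hik] at ht
    exact ht
  · rw [if_neg hik, if_neg hik]

theorem range_lemma (k m : Nat) (hk : 0 < k) (j : Nat) :
    (j < (m + k - 1)/k - 1) ↔ k*(j+1) < m := by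
  have h1 : j + 2 ≤ (m + k - 1)/k ↔ (j+2)*k ≤ m + k - 1 := Nat.le_div_iff_mul_le hk
  have h2 : (j+2)*k = k*(j+1) + k := by ring
  omega

theorem line_core (cs : List Char) (k : Nat) (hk : 0 < k) (hkm : k ≤ cs.length) (acc : Bool) :
    (match (PySem.List.pyRange 0 (cs.length : Int) (k : Int)).map
        (fun start => PySem.List.slice cs (some start) (some (start + (k : Int)))) with
     | [] => acc
     | first_robot :: rest => acc && rest.all (fun robot => robot == first_robot))
    = (acc && (PySem.Int.mod (cs.length : Int) (k : Int) == 0) &&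
        (PySem.List.pyRange (k : Int) (cs.length : Int) 1).all (fun i =>
          PySem.List.pyGet? cs i == PySem.List.pyGet? cs (PySem.Int.mod i (k : Int)))) := by
  set m := cs.length with hm
  have hkI : (0:Int) < (k:Int) := by exact_mod_cast hk
  have hmpos : 0 < m := lt_of_lt_of_le hk hkm
  set N := (m + k - 1)/k with hN
  -- the range of starts
  have hrange : PySem.List.pyRange 0 (m : Int) (k : Int)
      = (List.range N).map (fun j => ((k*j : Nat) : Int)) := by
    rw [PySem.List.pyRange_of_pos 0 (m:Int) hkI]
    have hif : (if (0:Int) < (m:Int) then (((m:Int) - 0 + (k:Int) - 1)/(k:Int)).toNat else 0) = N := by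
      rw [if_pos (by exact_mod_cast hmpos)]
      have : ((m:Int) - 0 + (k:Int) - 1) = ((m + k - 1 : Nat) : Int) := by omega
      rw [this, ← Int.natCast_ediv, Int.toNat_natCast, hN]
    rw [hif]
    apply List.map_congr_left
    intro j hj
    push_cast
    ring
  have hseg : ((PySem.List.pyRange 0 (m : Int) (k : Int)).map
        (fun start => PySem.List.slice cs (some start) (some (start + (k : Int)))))
      = (List.range N).map (fun j => (cs.drop (k*j)).take k) := by
    rw [hrange, List.map_map]
    apply List.map_congr_left
    intro j hj
    simp only [Function.comp]
    have : ((k*j : Nat) : Int) + (k : Int) = ((k*j : Nat) : Int) + ((k : Nat) : Int) := by norm_num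
    rw [this, PySem.List.slice_natCast_add]
  have hN1 : N = (N - 1) + 1 := by
    have h1 : 1 ≤ (m + k - 1)/k := by
      apply (Nat.le_div_iff_mul_le hk).2
      omega
    omega
  rw [hseg, hN1, List.range_succ_eq_map, List.map_cons]
  simp only [Nat.mul_zero, List.drop_zero]
  rw [Bool.eq_iff_iff]
  simp only [Bool.and_eq_true, List.all_eq_true, List.mem_map, List.mem_range, beq_iff_eq,
    forall_exists_index, and_imp, PySem.List.mem_pyRange_one, beq_iff_eq]
  constructor
  · rintro ⟨hacc, hall⟩
    have H : ∀ j, 0 < j → k*j < m → (cs.drop (k*j)).take k = cs.take k := by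
      intro j hj hjm
      obtain ⟨j', rfl⟩ : ∃ j', j = j' + 1 := ⟨j - 1, by omega⟩
      exact hall _ (j'+1) j' ((range_lemma k m hk j').2 hjm) rfl rfl
    have hdvd : k ∣ m := core_fwd_dvd cs k m hk hkm hm H
    have hper := core_fwd_per cs k m hk hm H
    refine ⟨⟨hacc, ?_⟩, ?_⟩
    · rw [PySem.Int.mod_natCast]
      exact_mod_cast Nat.mod_eq_zero_of_dvd hdvd
    · intro i hki him
      have h0i : (0:Int) ≤ i := le_trans (by exact_mod_cast Nat.zero_le k) hki
      lift i to ℕ using h0i with t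
      rw [PySem.Int.mod_natCast, PySem.List.pyGet?_natCast, PySem.List.pyGet?_natCast]
      exact hper t (by exact_mod_cast hki) (by exact_mod_cast him)
  · rintro ⟨⟨hacc, hmod⟩, hperI⟩
    have hdvd : k ∣ m := by
      rw [PySem.Int.mod_natCast] at hmod
      exact Nat.dvd_of_mod_eq_zero (by exact_mod_cast hmod)
    have hper : ∀ t, k ≤ t → t < m → cs[t]? = cs[t % k]? := by
      intro t hkt htm
      have := hperI (t : Int) (by exact_mod_cast hkt) (by exact_mod_cast htm)
      rwa [PySem.Int.mod_natCast, PySem.List.pyGet?_natCast, PySem.List.pyGet?_natCast] at this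
    refine ⟨hacc, ?_⟩
    intro x x1 x2 hlt hsucc hx
    subst hsucc
    subst hx
    exact core_bwd cs k m hkm hm hdvd hper (x2+1) (by omega) ((range_lemma k m hk x2).1 hlt)
theorem line_eq (acc : Bool) (line : String) (n : Int) (hn : 0 < n) :
    (let cs := line.toList
     let L : Int := (cs.length : Int)
     let robot_length := PySem.Int.floordiv L n
     if robot_length = 0 then acc
     else
       let robots := (PySem.List.pyRange 0 L robot_length).map
         (fun start => PySem.List.slice cs (some start) (some (start + robot_length)))
       match robots with
       | [] => acc
       | first_robot :: rest => acc && rest.all (fun robot => robot == first_robot))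
    =
    (let cs := line.toList
     let L : Int := (cs.length : Int)
     let robot_length := PySem.Int.floordiv L n
     if robot_length = 0 then acc
     else
       acc && (PySem.Int.mod L robot_length == 0) &&
         (PySem.List.pyRange robot_length L 1).all (fun i =>
           PySem.List.pyGet? cs i == PySem.List.pyGet? cs (PySem.Int.mod i robot_length))) := by
  dsimp only
  by_cases h0 : PySem.Int.floordiv ((line.toList.length : Nat) : Int) n = 0
  · rw [if_pos h0, if_pos h0]
  · rw [if_neg h0, if_neg h0]
    have hrled : PySem.Int.floordiv ((line.toList.length : Nat) : Int) n
        = ((line.toList.length : Nat) : Int) / n := PySem.Int.floordiv_eq_ediv_of_pos hn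
    have hrlnn : 0 ≤ PySem.Int.floordiv ((line.toList.length : Nat) : Int) n := by
      rw [hrled]; exact Int.ediv_nonneg (Int.natCast_nonneg _) (le_of_lt hn)
    have hrlm : PySem.Int.floordiv ((line.toList.length : Nat) : Int) n ≤ ((line.toList.length : Nat) : Int) := by
      rw [hrled]; exact Int.ediv_le_self _ (Int.natCast_nonneg _)
    obtain ⟨k, hkr⟩ : ∃ k : Nat, (k : Int) = PySem.Int.floordiv ((line.toList.length : Nat) : Int) n :=
      ⟨(PySem.Int.floordiv ((line.toList.length : Nat) : Int) n).toNat, Int.toNat_of_nonneg hrlnn⟩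
    rw [← hkr]
    have hkpos : 0 < k := by omega
    have hkm : k ≤ line.toList.length := by
      have := hrlm
      rw [← hkr] at this
      exact_mod_cast this
    exact line_core line.toList k hkpos hkm acc


theorem check_graphical_robots_spec : Claim_equal_check_graphical_robots := by
  intro rd n hdom hpre
  unfold Spec_check_graphical_robots check_graphical_robots check_graphical_robots_alt
  apply PySem.List.foldl_congr_mem
  intro acc line hmem
  obtain ⟨hn0, hcase⟩ := hpre line hmem
  rcases hcase with hpos | hline
  · exact line_eq acc line n hpos
  · subst hline
    have hnil : ("" : String).toList = [] := by decide
    simp only [hnil]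
    simp [PySem.Int.floordiv]
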